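-- pv_equiv track=rewrite | github.com/Romariozh/QA_Automation_22 | HW8/My_classes.py | determ_age_in_str
-- ===== SOURCE A (Python) =====
-- def determ_age_in_str(age_string: int) -> str:
--     """
--     The function determines the age and returns a string describing the age like 'рік', 'роки', 'років'
--     """
--     gradient_str_age = {
--         'рік': (1, 1),
--         'роки': (2, 3, 4),
--     }
--     string_add_age = 'років'
--     for key in gradient_str_age.keys():
--         if age_string % 10 in gradient_str_age[key] and age_string % 100 not in (11, 12, 13, 14):
--             string_add_age = key
--             break
--     return string_add_age
-- ===== SOURCE B (Python) =====
-- def determ_age_in_str(age_string: int) -> str: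
--     """Branch-free table lookup: the form is indexed directly by the last digit,
--     """
--     forms = ('років', 'рік', 'роки', 'роки', 'роки',
--              'років', 'років', 'років', 'років', 'років')
--     teen = (age_string % 100) // 10 == 1
--     return forms[0 if teen else age_string % 10]
-- ===== Notes on version B (the rewrite author's own statement) =====
-- stated objective: alternative
-- what changed: Replaces the dict table, first-match key loop and membership tests by a single 10-entry lookup table indexed by the last digit, with an arithmetic tens-digit test forcing index 0 for the teens decade.
import Mathlib
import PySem

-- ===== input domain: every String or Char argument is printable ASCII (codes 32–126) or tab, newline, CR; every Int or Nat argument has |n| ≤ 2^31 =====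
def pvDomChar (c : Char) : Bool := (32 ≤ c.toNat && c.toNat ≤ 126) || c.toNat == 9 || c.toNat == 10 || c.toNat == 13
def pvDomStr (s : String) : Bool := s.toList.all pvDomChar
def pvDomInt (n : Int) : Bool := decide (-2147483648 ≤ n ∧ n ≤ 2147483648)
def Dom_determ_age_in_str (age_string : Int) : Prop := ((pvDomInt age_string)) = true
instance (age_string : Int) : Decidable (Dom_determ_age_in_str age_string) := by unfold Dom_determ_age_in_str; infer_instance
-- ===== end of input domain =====

-- B replaces A's dict table, first-match loop and membership tests by one 10-entry table indexed by the last digit ; return values are identical.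

-- ===== PORT A =====
-- the dict {'рік': (1,1), 'роки': (2,3,4)} as an association list
def pvGradient : List (String × List Int) := [("рік", [1, 1]), ("роки", [2, 3, 4])]

-- the 'for key in …: if …: string_add_age = key; break' loop, with the default as accumulator
def pvLoopA (age_string : Int) : List (String × List Int) → String → String
  | [], acc => acc
  | (key, tup) :: rest, acc =>
    if tup.contains (PySem.Int.mod age_string 10)
        && !([11, 12, 13, 14] : List Int).contains (PySem.Int.mod age_string 100) then
      key
    else
      pvLoopA age_string rest acc

def determ_age_in_str (age_string : Int) : String :=
  pvLoopA age_string pvGradient "років"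

-- ===== PORT B =====
-- the 10-entry forms tuple of Source B
def pvForms : List String :=
  ["років", "рік", "роки", "роки", "роки", "років", "років", "років", "років", "років"]

def determ_age_in_str_alt (age_string : Int) : String :=
  let teen := PySem.Int.floordiv (PySem.Int.mod age_string 100) 10 == 1
  -- tuple indexing; the index is always in 0..9 here, so pyGet? is some and the default is dead
  (PySem.List.pyGet? pvForms (if teen then 0 else PySem.Int.mod age_string 10)).getD ""

-- ===== PRECONDITION & SPEC =====
def Spec_determ_age_in_str (age_string : Int) (out : String) : Prop := out = determ_age_in_str_alt age_string
instance (age_string : Int) (out : String) : Decidable (Spec_determ_age_in_str age_string out) := by unfold Spec_determ_age_in_str; infer_instance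

-- ===== CLAIM =====
def Claim_equal_determ_age_in_str : Prop := ∀ (age_string : Int), Dom_determ_age_in_str age_string → Spec_determ_age_in_str age_string (determ_age_in_str age_string)

-- ===== LEMMAS AND PROOFS =====

-- ===== VERDICT =====
theorem determ_age_in_str_spec : Claim_equal_determ_age_in_str := by
  intro age _
  unfold Spec_determ_age_in_str determ_age_in_str determ_age_in_str_alt
  simp only [pvLoopA, pvGradient]
  have e100 : PySem.Int.mod age 100 = age % 100 :=
    PySem.Int.mod_eq_emod_of_pos (by norm_num)
  have e10 : PySem.Int.mod age 10 = age % 100 % 10 := by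
    rw [PySem.Int.mod_eq_emod_of_pos (by norm_num)]
    exact (Int.emod_emod_of_dvd age (by norm_num)).symm
  rw [e100, e10]
  have hr0 : 0 ≤ age % 100 := Int.emod_nonneg _ (by norm_num)
  have hr1 : age % 100 < 100 := Int.emod_lt_of_pos _ (by norm_num)
  set r := age % 100 with hr
  clear_value r
  interval_cases r <;> rfl
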